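-- pv_equiv track=rewrite | github.com/sean-lo/staircase_boolean | staircase/utils.py | get_staircase_fourier_coeff_tuples
-- ===== SOURCE A (Python) =====
-- def get_staircase_fourier_coeff_tuples(n: int, d: int):
--     track_fourier_coeffs_tuples = []
--     for j in range(d + 1):
--         curr_coeff = []
--         for i in range(n):
--             if i < j:
--                 curr_coeff.append(-1)
--             else:
--                 curr_coeff.append(1)
--         curr_coeff = tuple(curr_coeff)
--         track_fourier_coeffs_tuples.append(curr_coeff)
--     return track_fourier_coeffs_tuples
-- ===== SOURCE B (Python) =====
-- def get_staircase_fourier_coeff_tuples(n: int, d: int):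
--     if d < 0:
--         return []
--     track_fourier_coeffs_tuples = []
--     curr = [1] * n
--     for j in range(d + 1):
--         track_fourier_coeffs_tuples.append(tuple(curr))
--         if j < n:
--             curr[j] = -1
--     return track_fourier_coeffs_tuples
-- ===== Notes on version B (the rewrite author's own statement) =====
-- stated objective: alternative
-- what changed: B keeps one running row that starts as [1]*n and is mutated in place (one sign flip per step) with a tuple snapshot taken before each flip, instead of rebuilding every row element-by-element with an inner loop and a branch per position.
import Mathlib
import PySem

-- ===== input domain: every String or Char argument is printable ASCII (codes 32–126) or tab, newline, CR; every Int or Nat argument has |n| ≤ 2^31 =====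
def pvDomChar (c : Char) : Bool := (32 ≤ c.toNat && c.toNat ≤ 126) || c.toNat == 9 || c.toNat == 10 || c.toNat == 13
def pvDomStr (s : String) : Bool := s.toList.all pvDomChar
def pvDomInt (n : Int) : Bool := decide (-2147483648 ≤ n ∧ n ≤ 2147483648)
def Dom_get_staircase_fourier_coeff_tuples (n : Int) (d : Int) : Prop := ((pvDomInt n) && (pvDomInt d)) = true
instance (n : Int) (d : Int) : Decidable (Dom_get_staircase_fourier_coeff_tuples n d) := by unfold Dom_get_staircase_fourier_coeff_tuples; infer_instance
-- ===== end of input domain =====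

-- B keeps one running row mutated in place (one sign flip per step, snapshot before each flip) instead of rebuilding every row with an inner loop (objective: alternative).

-- ===== PORT A =====
def get_staircase_fourier_coeff_tuples (n : Int) (d : Int) : List (List Int) :=
  (PySem.List.pyRange 0 (d + 1) 1).foldl (fun acc j =>
    acc ++ [(PySem.List.pyRange 0 n 1).foldl
      (fun cur i => if i < j then cur ++ [-1] else cur ++ [1]) []]) []

-- ===== PORT B =====
-- state = (track, curr); 'curr[j] = -1' is curr.set j.toNat (-1): exact since the guard gives 0 ≤ j < n = curr.length
def get_staircase_fourier_coeff_tuples_alt (n : Int) (d : Int) : List (List Int) :=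
  if d < 0 then []
  else ((PySem.List.pyRange 0 (d + 1) 1).foldl
    (fun st j =>
      (st.1 ++ [st.2], if j < n then st.2.set j.toNat (-1) else st.2))
    (([] : List (List Int)), List.replicate n.toNat (1 : Int))).1

-- ===== PRECONDITION & SPEC =====
def Spec_get_staircase_fourier_coeff_tuples (n : Int) (d : Int) (out : List (List Int)) : Prop := out = get_staircase_fourier_coeff_tuples_alt n d
instance (n : Int) (d : Int) (out : List (List Int)) : Decidable (Spec_get_staircase_fourier_coeff_tuples n d out) := by unfold Spec_get_staircase_fourier_coeff_tuples; infer_instance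

-- ===== CLAIM =====
def Claim_equal_get_staircase_fourier_coeff_tuples : Prop := ∀ (n : Int) (d : Int), Dom_get_staircase_fourier_coeff_tuples n d → Spec_get_staircase_fourier_coeff_tuples n d (get_staircase_fourier_coeff_tuples n d)

-- ===== LEMMAS AND PROOFS =====

-- the j-th staircase row: min(j,max(n,0)) leading -1's, 1's afterwards
def pvRow (n j : Int) : List Int :=
  List.replicate (min j (max n 0)).toNat (-1) ++ List.replicate (max n 0 - min j (max n 0)).toNat 1

-- A's inner loop appends one element per index; it is the map of the branch over the range.
lemma inner_foldl_eq_map (j : Int) :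
    ∀ (l : List Int) (acc : List Int),
      l.foldl (fun cur i => if i < j then cur ++ [-1] else cur ++ [1]) acc
        = acc ++ l.map (fun i => if i < j then (-1 : Int) else 1) := by
  intro l
  induction l with
  | nil => simp
  | cons x xs ih =>
    intro acc
    by_cases h : x < j <;> simp [h, ih, List.append_assoc]

lemma map_branch_eq_row (n j : Int) (hj : 0 ≤ j) :
    (PySem.List.pyRange 0 n 1).map (fun i => if i < j then (-1 : Int) else 1) = pvRow n j := by
  unfold pvRow
  by_cases hn : n ≤ 0
  · rw [PySem.List.pyRange_one_eq_nil (by omega)]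
    have h1 : max n 0 = 0 := by omega
    have h2 : min j (max n 0) = 0 := by omega
    simp [h1]
    exact hj
  · push_neg at hn
    have hk : max n 0 = n := by omega
    set m : Int := min j n with hm
    have hm0 : 0 ≤ m := by omega
    have hmn : m ≤ n := by omega
    rw [PySem.List.pyRange_one_append 0 m n hm0 hmn, List.map_append]
    have hfirst : (PySem.List.pyRange 0 m 1).map (fun i => if i < j then (-1 : Int) else 1)
        = List.replicate m.toNat (-1) := by
      rw [List.map_congr_left (g := fun _ => (-1 : Int)) ?_]
      · rw [List.map_const', PySem.List.length_pyRange_one]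
        simp
      · intro x hx
        rw [PySem.List.mem_pyRange_one] at hx
        have : x < j := by omega
        simp [this]
    have hsecond : (PySem.List.pyRange m n 1).map (fun i => if i < j then (-1 : Int) else 1)
        = List.replicate (n - m).toNat 1 := by
      by_cases hjn : j ≤ n
      · have hmj : m = j := by omega
        rw [List.map_congr_left (g := fun _ => (1 : Int)) ?_]
        · rw [List.map_const', PySem.List.length_pyRange_one]
        · intro x hx
          rw [PySem.List.mem_pyRange_one] at hx
          have : ¬ x < j := by omega
          simp [this]
      · have hmn' : m = n := by omega
        rw [hmn', PySem.List.pyRange_one_eq_nil le_rfl]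
        simp
    rw [hfirst, hsecond, hk, ← hm]

-- one step of B's loop moves pvRow n j to pvRow n (j+1)
lemma row_step (n j : Int) (hj : 0 ≤ j) :
    (if j < n then (pvRow n j).set j.toNat (-1) else pvRow n j) = pvRow n (j + 1) := by
  by_cases h : j < n
  · simp only [h, if_true]
    have hk : max n 0 = n := by omega
    have h1 : min j (max n 0) = j := by omega
    have h2 : min (j + 1) (max n 0) = j + 1 := by omega
    unfold pvRow
    rw [h1, h2, hk]
    have hlen : (List.replicate j.toNat (-1 : Int)).length = j.toNat := List.length_replicate
    rw [List.set_append, hlen]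
    simp only [lt_irrefl, Nat.sub_self]
    have hpos : (n - j).toNat = (n - (j + 1)).toNat + 1 := by omega
    rw [hpos, List.replicate_succ, List.set_cons_zero]
    have h3 : (j + 1).toNat = j.toNat + 1 := by omega
    rw [h3, List.replicate_succ']
    simp
  · simp only [h, if_false]
    have h1 : min j (max n 0) = min (j + 1) (max n 0) := by omega
    unfold pvRow
    rw [h1]

lemma B_loop (n : Int) : ∀ (m : Nat) (a b : Int), 0 ≤ a → (b - a).toNat = m →
    ∀ (acc : List (List Int)),
      ((PySem.List.pyRange a b 1).foldl
        (fun st j => (st.1 ++ [st.2], if j < n then st.2.set j.toNat (-1) else st.2))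
        (acc, pvRow n a)).1
      = acc ++ (PySem.List.pyRange a b 1).map (pvRow n) := by
  intro m
  induction m with
  | zero =>
    intro a b ha hm acc
    rw [PySem.List.pyRange_one_eq_nil (by omega)]
    simp
  | succ k ih =>
    intro a b ha hm acc
    have hab : a < b := by omega
    rw [PySem.List.pyRange_one_cons hab]
    simp only [List.foldl_cons, List.map_cons]
    rw [row_step n a ha]
    rw [ih (a + 1) b (by omega) (by omega)]
    simp

-- ===== VERDICT =====
theorem get_staircase_fourier_coeff_tuples_spec : Claim_equal_get_staircase_fourier_coeff_tuples := by
  intro n d _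
  unfold Spec_get_staircase_fourier_coeff_tuples
  unfold get_staircase_fourier_coeff_tuples get_staircase_fourier_coeff_tuples_alt
  by_cases hd : d < 0
  · rw [if_pos hd, PySem.List.pyRange_one_eq_nil (a := 0) (b := d + 1) (by omega)]
    simp
  rw [if_neg hd]
  have hrow0 : List.replicate n.toNat (1 : Int) = pvRow n 0 := by
    unfold pvRow
    have h1 : min 0 (max n 0) = 0 := by omega
    have h2 : (max n 0).toNat = n.toNat := by omega
    rw [h1]
    simp [h2]
  rw [hrow0, B_loop n (d + 1 - 0).toNat 0 (d + 1) le_rfl rfl []]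
  rw [PySem.List.foldl_append_singleton_eq_map]
  simp only [List.nil_append]
  apply List.map_congr_left
  intro j hj
  rw [PySem.List.mem_pyRange_one] at hj
  rw [inner_foldl_eq_map, List.nil_append, map_branch_eq_row n j hj.1]
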